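-- pv_equiv track=rewrite | github.com/UltimaRatio-Regum/voxlibris | backend/text_parser.py | _words_to_chars
-- ===== SOURCE A (Python) =====
-- def _words_to_chars(text: str, word_count: int) -> int:
--     """Convert word count to approximate character position."""
--     words = text.split()
--     if word_count >= len(words):
--         return len(text)
--
--     char_pos = 0
--     current_word = 0
--     for i, char in enumerate(text):
--         if char.isspace():
--             if i > 0 and not text[i-1].isspace():
--                 current_word += 1
--                 if current_word >= word_count:
--                     return i
--
--     avg_chars = len(text) / max(1, len(words))
--     return int(word_count * avg_chars)
-- ===== SOURCE B (Python) =====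
-- def _words_to_chars(text: str, word_count: int) -> int:
--     """Convert word count to approximate character position."""
--     words = text.split()
--     if word_count >= len(words):
--         return len(text)
--     if word_count <= 0:
--         return 0
--     pos = 0
--     for word in words[:word_count]:
--         pos = text.find(word, pos) + len(word)
--     return pos
-- ===== Notes on version B (the rewrite author's own statement) =====
-- stated objective: alternative
-- what changed: A scans every character with a look-behind test counting word-end boundaries; B works on the split() tokens themselves, advancing a position with str.find for each of the first word_count words and returning the end of the last one. Pre_ excludes negative word counts (outside the natural domain of a word count).
-- intended difference: On word_count == 0 with at least one word whose end is followed by whitespace, A returns the end of the FIRST word (its counter check fires on the first boundary), while B returns 0, the character position after zero words, which is the intended value. — e.g. on _words_to_chars("a b", 0): A returns 1, B returns 0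
-- outside the precondition, e.g. on _words_to_chars('a b', -3): A returns 1, B returns 0
import Mathlib
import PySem

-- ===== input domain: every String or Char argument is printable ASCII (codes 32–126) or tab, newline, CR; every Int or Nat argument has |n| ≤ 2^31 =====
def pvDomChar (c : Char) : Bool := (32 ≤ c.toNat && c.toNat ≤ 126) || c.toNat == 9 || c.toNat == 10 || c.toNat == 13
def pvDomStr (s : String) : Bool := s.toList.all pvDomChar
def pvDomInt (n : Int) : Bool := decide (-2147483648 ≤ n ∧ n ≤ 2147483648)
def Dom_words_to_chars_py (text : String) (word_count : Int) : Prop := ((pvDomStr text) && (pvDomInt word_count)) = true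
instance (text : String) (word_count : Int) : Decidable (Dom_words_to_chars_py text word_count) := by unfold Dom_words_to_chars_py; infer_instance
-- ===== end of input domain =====

-- B replaces A's character scan (look-behind boundary test plus a running counter) by a loop
-- over the split() tokens themselves: it advances a position with str.find for each of the
-- first word_count words and returns the end of the last one (objective: alternative).
-- Note: A's fallback `int(word_count * (len(text) / max(1, len(words))))` is ported as exact
-- truncating division; on every input admitted by Pre_ that reaches it the value is 0, so the
-- float arithmetic is exact there.

-- ===== PORT A =====
-- the for-loop of A over enumerate(text): cur is current_word; returns some i on early return
def wtcLoopA (cs : List Char) (wc : Int) : List (Int × Char) → Int → Option Int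
  | [], _ => none
  | (i, c) :: rest, cur =>
    if PySem.Chars.isspace c then
      if 0 < i ∧ ((PySem.List.pyGet? cs (i - 1)).map PySem.Chars.isspace).getD true = false then
        if cur + 1 ≥ wc then some i else wtcLoopA cs wc rest (cur + 1)
      else wtcLoopA cs wc rest cur
    else wtcLoopA cs wc rest cur

def words_to_chars_py (text : String) (word_count : Int) : Int :=
  let cs := text.toList
  let words := PySem.Chars.split₀ cs
  if word_count ≥ (words.length : Int) then (cs.length : Int)
  else
    match wtcLoopA cs word_count (PySem.List.enumerate cs) 0 with
    | some i => i
    | none => PySem.Int.truncdiv (word_count * (cs.length : Int)) (max 1 (words.length : Int))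

-- ===== PORT B =====
def words_to_chars_py_alt (text : String) (word_count : Int) : Int :=
  let cs := text.toList
  let words := PySem.Chars.split₀ cs
  if word_count ≥ (words.length : Int) then (cs.length : Int)
  else if word_count ≤ 0 then 0
  else (PySem.List.slice words none (some word_count)).foldl
        (fun pos w => PySem.Chars.findFrom cs w pos none + (w.length : Int)) 0

-- ===== PRECONDITION & SPEC =====
-- Pre_ excludes negative word counts: a word count is naturally a non-negative quantity and
-- negative values are outside the function's natural domain (A still returns there).
def Pre_words_to_chars_py (text : String) (word_count : Int) : Prop := 0 ≤ word_count
instance (text : String) (word_count : Int) : Decidable (Pre_words_to_chars_py text word_count) := by unfold Pre_words_to_chars_py; infer_instance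

def pvWitness_words_to_chars_py : String × Int := ("a b", 1)

-- On word_count = 0 with at least one word whose end is followed by whitespace, A returns the
-- end of the FIRST word (its counter check fires on the first boundary) while B returns 0, the
-- character position after zero words, which is the intended value.
def D_words_to_chars_py (text : String) (word_count : Int) : Prop :=
  word_count = 0 ∧ 0 < (PySem.Chars.split₀ text.toList).length ∧
    (2 ≤ (PySem.Chars.split₀ text.toList).length ∨
      ((text.toList.getLast?).map PySem.Chars.isspace).getD false = true)
instance (text : String) (word_count : Int) : Decidable (D_words_to_chars_py text word_count) := by unfold D_words_to_chars_py; infer_instance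

def Spec_words_to_chars_py (text : String) (word_count : Int) (out : Int) : Prop := ¬ D_words_to_chars_py text word_count → out = words_to_chars_py_alt text word_count
instance (text : String) (word_count : Int) (out : Int) : Decidable (Spec_words_to_chars_py text word_count out) := by unfold Spec_words_to_chars_py; infer_instance

def pvDiffWitness_words_to_chars_py : String × Int := ("a b", 0)
def pvDiffWitnessOut_words_to_chars_py : Int × Int := (1, 0)

-- ===== CLAIM (what is proved, stated in full; the proofs are below) =====
def Claim_unchanged_words_to_chars_py : Prop := ∀ (text : String) (word_count : Int), Dom_words_to_chars_py text word_count → Pre_words_to_chars_py text word_count → Spec_words_to_chars_py text word_count (words_to_chars_py text word_count)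
def Claim_changed_words_to_chars_py : Prop := Dom_words_to_chars_py (pvDiffWitness_words_to_chars_py.1) (pvDiffWitness_words_to_chars_py.2) ∧ Pre_words_to_chars_py (pvDiffWitness_words_to_chars_py.1) (pvDiffWitness_words_to_chars_py.2) ∧ D_words_to_chars_py (pvDiffWitness_words_to_chars_py.1) (pvDiffWitness_words_to_chars_py.2) ∧ words_to_chars_py (pvDiffWitness_words_to_chars_py.1) (pvDiffWitness_words_to_chars_py.2) = pvDiffWitnessOut_words_to_chars_py.1 ∧ words_to_chars_py_alt (pvDiffWitness_words_to_chars_py.1) (pvDiffWitness_words_to_chars_py.2) = pvDiffWitnessOut_words_to_chars_py.2 ∧ pvDiffWitnessOut_words_to_chars_py.1 ≠ pvDiffWitnessOut_words_to_chars_py.2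
def Claim_exact_words_to_chars_py : Prop := ∀ (text : String) (word_count : Int), Dom_words_to_chars_py text word_count → Pre_words_to_chars_py text word_count → D_words_to_chars_py text word_count → words_to_chars_py text word_count ≠ words_to_chars_py_alt text word_count

-- ===== LEMMAS AND PROOFS =====

def wtcToks : List Char → Int → List (Int × List Char)
  | [], _ => []
  | c :: r, s =>
    if PySem.Chars.isspace c then wtcToks r (s + 1)
    else (s, c :: r.takeWhile (fun d => !PySem.Chars.isspace d)) ::
         wtcToks (r.dropWhile (fun d => !PySem.Chars.isspace d))
           (s + 1 + (r.takeWhile (fun d => !PySem.Chars.isspace d)).length)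
  termination_by u _ => u.length
  decreasing_by all_goals simp [Nat.lt_succ_iff, List.length_dropWhile_le]

-- T2: split₀ computes the tokens of wtcToks, for any start position
lemma wtcSplitGo_eq : ∀ (u cur : List Char) (acc : List (List Char)) (s : Int),
    PySem.Chars.split₀.go u cur acc =
      acc.reverse ++ (if cur.isEmpty then (wtcToks u s).map Prod.snd
        else (cur.reverse ++ u.takeWhile (fun d => !PySem.Chars.isspace d)) ::
          (wtcToks (u.dropWhile (fun d => !PySem.Chars.isspace d)) s).map Prod.snd) := by
  intro u
  induction u with
  | nil =>
    intro cur acc s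
    cases cur with
    | nil => simp [PySem.Chars.split₀.go, wtcToks]
    | cons c cur' => simp [PySem.Chars.split₀.go, wtcToks]
  | cons c r ih =>
    intro cur acc s
    by_cases hc : PySem.Chars.isspace c
    · cases cur with
      | nil =>
        simp only [PySem.Chars.split₀.go, hc, if_pos, List.isEmpty_nil, if_true]
        rw [ih [] acc (s + 1)]
        simp [wtcToks, hc]
      | cons d cur' =>
        simp only [PySem.Chars.split₀.go, hc, if_pos, List.isEmpty_cons, if_false]
        rw [ih [] ((d :: cur').reverse :: acc) (s + 1)]
        simp [wtcToks, hc, List.takeWhile, List.dropWhile]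
    · simp only [PySem.Chars.split₀.go, hc, if_neg, Bool.false_eq_true]
      cases cur with
      | nil =>
        rw [ih [c] acc (s + 1 + ((r.takeWhile (fun d => !PySem.Chars.isspace d)).length : Int))]
        simp [wtcToks, hc, List.takeWhile, List.dropWhile]
      | cons d cur' =>
        rw [ih (c :: d :: cur') acc s]
        simp [wtcToks, hc, List.takeWhile, List.dropWhile]

lemma wtcSplit_eq (u : List Char) (s : Int) :
    PySem.Chars.split₀ u = (wtcToks u s).map Prod.snd := by
  rw [PySem.Chars.split₀, wtcSplitGo_eq u [] [] s]; simp

-- T3a: no tokens means all whitespace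
lemma wtcToks_nil_iff : ∀ (u : List Char) (s : Int),
    wtcToks u s = [] ↔ ∀ c ∈ u, PySem.Chars.isspace c := by
  intro u
  induction u with
  | nil => intro s; simp [wtcToks]
  | cons c r ih =>
    intro s
    by_cases hc : PySem.Chars.isspace c
    · simp [wtcToks, hc, ih (s + 1)]
    · simp [wtcToks, hc]

-- T3b: structure of the first token
lemma wtcToks_cons (u : List Char) (s st : Int) (t : List Char) (T' : List (Int × List Char))
    (h : wtcToks u s = (st, t) :: T') :
    ∃ sp u', u = sp ++ t ++ u' ∧ (∀ c ∈ sp, PySem.Chars.isspace c) ∧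
      st = s + sp.length ∧ t ≠ [] ∧ (∀ c ∈ t, ¬ PySem.Chars.isspace c) ∧
      T' = wtcToks u' (st + t.length) ∧ (∀ c ∈ u'.take 1, PySem.Chars.isspace c) := by
  induction u generalizing s with
  | nil => simp [wtcToks] at h
  | cons c r ih =>
    by_cases hc : PySem.Chars.isspace c
    · rw [wtcToks, if_pos hc] at h
      obtain ⟨sp, u', h1, h2, h3, h4, h5, h6, h7⟩ := ih (s + 1) h
      exact ⟨c :: sp, u', by simpa using h1, by simpa [hc] using h2,
        by simp [h3]; omega, h4, h5, h6, h7⟩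
    · rw [wtcToks, if_neg hc] at h
      obtain ⟨h1, h2⟩ := List.cons.inj h
      have hst : st = s := (Prod.mk.inj h1.symm).1
      have ht : t = c :: r.takeWhile (fun d => !PySem.Chars.isspace d) := (Prod.mk.inj h1.symm).2
      refine ⟨[], r.dropWhile (fun d => !PySem.Chars.isspace d), ?_, by simp, by simp [hst], ?_, ?_, ?_, ?_⟩
      · simp [ht, List.takeWhile_append_dropWhile]
      · simp [ht]
      · intro x hx
        rw [ht] at hx
        rcases List.mem_cons.mp hx with hx | hx
        · subst hx; simpa using hc
        · have := List.mem_takeWhile_imp hx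
          simpa using this
      · rw [← h2, ht, hst]
        congr 1
        simp; omega
      · intro x hx
        cases hdw : r.dropWhile (fun d => !PySem.Chars.isspace d) with
        | nil => rw [hdw] at hx; simp at hx
        | cons y ys =>
          rw [hdw] at hx
          simp at hx
          subst hx
          have := List.head_dropWhile_not (fun d => !PySem.Chars.isspace d)
            (l := r) (by simp [hdw])
          simp only [hdw] at this
          simpa using this

-- T4: find on spaces ++ (token ++ rest): the first occurrence is right after the spaces
lemma wtcFindGo_spaces : ∀ (sp : List Char) (u : List Char) (wh : Char) (wt : List Char) (k : Nat),
    (∀ c ∈ sp, PySem.Chars.isspace c) → ¬ PySem.Chars.isspace wh → (wh :: wt) <+: u →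
    PySem.Chars.find.go (wh :: wt) (sp ++ u) k = (k : Int) + sp.length := by
  intro sp
  induction sp with
  | nil =>
    intro u wh wt k _ hwh hpre
    cases u with
    | nil => simp at hpre
    | cons y ys =>
      rw [List.nil_append, PySem.Chars.find.go]
      rw [if_pos (by simpa [List.isPrefixOf_iff_prefix] using hpre)]
      simp
  | cons g sp' ih =>
    intro u wh wt k hsp hwh hpre
    have hg : PySem.Chars.isspace g := hsp g (by simp)
    rw [List.cons_append, PySem.Chars.find.go]
    rw [if_neg ?hne]
    case hne =>
      intro hp
      rw [List.isPrefixOf_iff_prefix] at hp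
      have : wh = g := (List.cons_prefix_cons.mp hp).1
      rw [this] at hwh; exact hwh hg
    rw [ih u wh wt (k + 1) (fun c hc => hsp c (by simp [hc])) hwh hpre]
    simp; omega

lemma wtcFindFrom_token (cs : List Char) (p : Int) (sp t u' : List Char)
    (hp : 0 ≤ p) (hple : p.toNat ≤ cs.length)
    (hdecomp : cs.drop p.toNat = sp ++ t ++ u')
    (ht : t ≠ []) (hsp : ∀ c ∈ sp, PySem.Chars.isspace c)
    (hth : ∀ c ∈ t, ¬ PySem.Chars.isspace c) :
    PySem.Chars.findFrom cs t p none = p + sp.length := by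
  obtain ⟨wh, wt, rfl⟩ : ∃ wh wt, t = wh :: wt := by
    cases t with
    | nil => exact absurd rfl ht
    | cons a b => exact ⟨a, b, rfl⟩
  have hwh : ¬ PySem.Chars.isspace wh := hth wh (by simp)
  have hfind : PySem.Chars.find (cs.drop p.toNat) (wh :: wt) = (0 : Int) + sp.length := by
    rw [hdecomp, List.append_assoc]
    exact wtcFindGo_spaces sp ((wh :: wt) ++ u') wh wt 0 hsp hwh (by simp)
  rw [PySem.Chars.findFrom]
  simp only [Int.toNat_natCast, List.take_length]
  rw [if_neg (show ¬ p < 0 by omega)]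
  rw [if_neg (show ¬ (cs.length : Int) < p by omega)]
  rw [hfind]
  rw [if_neg (show (0 : Int) + (sp.length : Int) ≠ -1 by omega)]
  omega

-- T5: B's fold over the first k+1 tokens lands on the end of token k
lemma wtcFoldB (cs : List Char) : ∀ (k : Nat) (u : List Char) (p : Int) (T : List (Int × List Char)),
    0 ≤ p → cs.drop p.toNat = u → T = wtcToks u p → ∀ (hk : k < T.length),
    ((T.map Prod.snd).take (k + 1)).foldl
        (fun pos w => PySem.Chars.findFrom cs w pos none + (w.length : Int)) p
      = T[k].1 + (T[k].2.length : Int) := by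
  intro k
  induction k with
  | zero =>
    intro u p T hp hdrop hT hk
    obtain ⟨⟨st, t⟩, T', rfl⟩ : ∃ a T', T = a :: T' := by
      cases T with
      | nil => simp at hk
      | cons a T' => exact ⟨a, T', rfl⟩
    obtain ⟨sp, u', hu, hsp, hst, ht, hth, hT', hh⟩ := wtcToks_cons u p st t T' hT.symm
    have hune : u ≠ [] := by rw [hu]; simp [ht]
    have hple : p.toNat ≤ cs.length := by
      by_contra hgt
      rw [List.drop_eq_nil_of_le (by omega)] at hdrop
      exact hune hdrop.symm
    have hfind := wtcFindFrom_token cs p sp t u' hp hple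
      (by rw [hdrop, hu]) ht hsp hth
    simp only [List.map_cons, List.take_succ_cons, List.take_zero, List.foldl_cons,
      List.foldl_nil, List.getElem_cons_zero]
    rw [hfind, hst]
  | succ k ih =>
    intro u p T hp hdrop hT hk
    obtain ⟨⟨st, t⟩, T', rfl⟩ : ∃ a T', T = a :: T' := by
      cases T with
      | nil => simp at hk
      | cons a T' => exact ⟨a, T', rfl⟩
    obtain ⟨sp, u', hu, hsp, hst, ht, hth, hT', hh⟩ := wtcToks_cons u p st t T' hT.symm
    have hune : u ≠ [] := by rw [hu]; simp [ht]
    have hple : p.toNat ≤ cs.length := by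
      by_contra hgt
      rw [List.drop_eq_nil_of_le (by omega)] at hdrop
      exact hune hdrop.symm
    have hfind := wtcFindFrom_token cs p sp t u' hp hple
      (by rw [hdrop, hu]) ht hsp hth
    have hdrop' : cs.drop (st + (t.length : Int)).toNat = u' := by
      have h1 : (st + (t.length : Int)).toNat = p.toNat + (sp.length + t.length) := by
        rw [hst]; omega
      rw [h1, ← List.drop_drop, hdrop, hu,
        show sp.length + t.length = (sp ++ t).length by simp, List.drop_left]
    have hrec := ih u' (st + (t.length : Int)) T' (by rw [hst]; omega) hdrop' hT'
      (by simpa using hk)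
    simp only [List.map_cons, List.take_succ_cons, List.foldl_cons, List.getElem_cons_succ]
    rw [hfind,
      show p + (sp.length : Int) + (t.length : Int) = st + (t.length : Int) from by rw [hst]]
    exact hrec

def wtcEnds : List Char → Int → Bool → List Int
  | [], _, _ => []
  | c :: rest, s, prev =>
    if PySem.Chars.isspace c then
      (if prev then wtcEnds rest (s + 1) true else s :: wtcEnds rest (s + 1) true)
    else wtcEnds rest (s + 1) false

-- walking a whitespace-free run in state false emits nothing
lemma wtcEnds_run_nil : ∀ (t : List Char) (s : Int), (∀ c ∈ t, ¬ PySem.Chars.isspace c) →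
    wtcEnds t s false = [] := by
  intro t
  induction t with
  | nil => intro s _; simp [wtcEnds]
  | cons c r ih =>
    intro s h
    rw [wtcEnds, if_neg (by simpa using h c (by simp))]
    exact ih (s + 1) (fun x hx => h x (by simp [hx]))

-- a whitespace-free run followed by a space emits its end boundary
lemma wtcEnds_run_cons : ∀ (t : List Char) (d : Char) (v' : List Char) (s : Int),
    (∀ c ∈ t, ¬ PySem.Chars.isspace c) → PySem.Chars.isspace d →
    wtcEnds (t ++ d :: v') s false
      = (s + (t.length : Int)) :: wtcEnds v' (s + (t.length : Int) + 1) true := by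
  intro t
  induction t with
  | nil =>
    intro d v' s _ hd
    rw [List.nil_append, wtcEnds, if_pos hd]
    simp
  | cons c r ih =>
    intro d v' s h hd
    rw [List.cons_append, wtcEnds, if_neg (by simpa using h c (by simp))]
    rw [ih d v' (s + 1) (fun x hx => h x (by simp [hx])) hd]
    simp only [List.length_cons]
    push_cast
    ring_nf

-- T6: the boundary list is the token-end list, the end touching the end of the text dropped
lemma wtcEnds_toks : ∀ (u : List Char) (s : Int),
    wtcEnds u s true
      = ((wtcToks u s).map (fun q => q.1 + (q.2.length : Int))).filter
          (fun e => decide (e < s + (u.length : Int))) := by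
  intro u s
  induction u, s using wtcToks.induct with
  | case1 s => simp [wtcEnds, wtcToks]
  | case2 c r s hc ih =>
    rw [wtcEnds, if_pos hc, if_pos rfl, wtcToks, if_pos hc, ih]
    have hB : s + ((c :: r).length : Int) = (s + 1) + (r.length : Int) := by
      simp; omega
    rw [hB]
  | case3 c r s hc ih =>
    rw [wtcEnds, if_neg hc, wtcToks, if_neg hc]
    have htw : ∀ x ∈ r.takeWhile (fun d => !PySem.Chars.isspace d), ¬ PySem.Chars.isspace x := by
      intro x hx
      simpa using List.mem_takeWhile_imp hx
    cases hdw : r.dropWhile (fun d => !PySem.Chars.isspace d) with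
    | nil =>
      have hall : ∀ x ∈ r, ¬ PySem.Chars.isspace x := by
        intro x hx
        have hx2 : x ∈ r.takeWhile (fun d => !PySem.Chars.isspace d)
            ++ r.dropWhile (fun d => !PySem.Chars.isspace d) := by
          rw [List.takeWhile_append_dropWhile]; exact hx
        rw [hdw, List.append_nil] at hx2
        exact htw x hx2
      have hrlen : r.length = (r.takeWhile (fun d => !PySem.Chars.isspace d)).length := by
        conv_lhs => rw [← List.takeWhile_append_dropWhile (p := fun d => !PySem.Chars.isspace d) (l := r)]
        rw [hdw]; simp
      rw [wtcEnds_run_nil r (s + 1) hall]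
      rw [wtcToks]
      simp only [List.map_cons, List.map_nil, List.filter, List.length_cons]
      split
      · next hcond =>
          exfalso
          simp only [decide_eq_true_eq] at hcond
          push_cast at hcond
          omega
      · rfl
    | cons d v' =>
      have hd : PySem.Chars.isspace d := by
        have := List.head_dropWhile_not (fun x => !PySem.Chars.isspace x)
          (l := r) (by simp [hdw])
        simp only [hdw] at this
        simpa using this
      have hr : r = r.takeWhile (fun x => !PySem.Chars.isspace x) ++ d :: v' := by
        conv_lhs => rw [← List.takeWhile_append_dropWhile (p := fun x => !PySem.Chars.isspace x) (l := r)]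
        rw [hdw]
      have hrlen : (r.length : Int)
          = ((r.takeWhile (fun x => !PySem.Chars.isspace x)).length : Int) + 1 + v'.length := by
        conv_lhs => rw [hr]
        simp only [List.length_append, List.length_cons]
        push_cast
        ring
      rw [show wtcEnds r (s + 1) false
          = (s + 1 + ((r.takeWhile (fun x => !PySem.Chars.isspace x)).length : Int)) ::
            wtcEnds v' (s + 1 + ((r.takeWhile (fun x => !PySem.Chars.isspace x)).length : Int) + 1) true from by
        conv_lhs => rw [hr]
        exact wtcEnds_run_cons _ d v' (s + 1) htw hd]
      rw [hdw] at ih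
      rw [show wtcToks (d :: v') (s + 1 + ((r.takeWhile (fun d => !PySem.Chars.isspace d)).length : Int))
          = wtcToks v' (s + 1 + ((r.takeWhile (fun d => !PySem.Chars.isspace d)).length : Int) + 1) from by
        rw [wtcToks, if_pos hd]] at ih ⊢
      rw [wtcEnds, if_pos hd, if_pos rfl] at ih
      rw [ih]
      simp only [List.map_cons, List.filter, List.length_cons]
      split
      · next hcond =>
          congr 1
          · push_cast
            ring
          · apply List.filter_congr
            intro e _
            simp only [decide_eq_decide]
            push_cast at hrlen ⊢
            omega
      · next hcond =>
          exfalso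
          simp only [decide_eq_false_iff_not] at hcond
          push_cast at hcond hrlen
          omega

-- T7: positions of tokens are ordered and bounded
lemma wtcToks_bounds : ∀ (i : Nat) (u : List Char) (s : Int) (T : List (Int × List Char)),
    T = wtcToks u s → ∀ (hi : i < T.length),
    s ≤ T[i].1 ∧ T[i].2 ≠ [] ∧ T[i].1 + (T[i].2.length : Int) ≤ s + u.length ∧
      (∀ (hi1 : i + 1 < T.length), T[i].1 + (T[i].2.length : Int) < T[i + 1].1) := by
  intro i
  induction i with
  | zero =>
    intro u s T hT hi
    obtain ⟨⟨st, t⟩, T', rfl⟩ : ∃ a T', T = a :: T' := by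
      cases T with
      | nil => simp at hi
      | cons a T' => exact ⟨a, T', rfl⟩
    obtain ⟨sp, u', hu, hsp, hst, ht, hth, hT', hh⟩ := wtcToks_cons u s st t T' hT.symm
    have hulen : (u.length : Int) = sp.length + t.length + u'.length := by
      rw [hu]; push_cast [List.length_append]; ring
    refine ⟨by simp only [List.getElem_cons_zero]; omega, by simpa using ht,
      by simp only [List.getElem_cons_zero]; omega, ?_⟩
    intro hi1
    obtain ⟨⟨st2, t2⟩, T'', rfl⟩ : ∃ a T'', T' = a :: T'' := by
      cases T' with
      | nil => simp at hi1
      | cons a T'' => exact ⟨a, T'', rfl⟩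
    obtain ⟨sp2, u'', hu2, hsp2, hst2, ht2, hth2, _, _⟩ :=
      wtcToks_cons u' (st + (t.length : Int)) st2 t2 T'' hT'.symm
    have hsp2ne : sp2 ≠ [] := by
      intro hnil
      rw [hnil, List.nil_append] at hu2
      obtain ⟨w2h, w2t, rfl⟩ : ∃ a b, t2 = a :: b := by
        cases t2 with
        | nil => exact absurd rfl ht2
        | cons a b => exact ⟨a, b, rfl⟩
      have : PySem.Chars.isspace w2h := by
        apply hh
        rw [hu2]; simp
      exact hth2 w2h (by simp) this
    have : 1 ≤ sp2.length := by
      cases sp2 with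
      | nil => exact absurd rfl hsp2ne
      | cons _ _ => simp
    simp only [List.getElem_cons_zero, List.getElem_cons_succ]
    omega
  | succ i ih =>
    intro u s T hT hi
    obtain ⟨⟨st, t⟩, T', rfl⟩ : ∃ a T', T = a :: T' := by
      cases T with
      | nil => simp at hi
      | cons a T' => exact ⟨a, T', rfl⟩
    obtain ⟨sp, u', hu, hsp, hst, ht, hth, hT', hh⟩ := wtcToks_cons u s st t T' hT.symm
    have hulen : (u.length : Int) = sp.length + t.length + u'.length := by
      rw [hu]; push_cast [List.length_append]; ring
    have hrec := ih u' (st + (t.length : Int)) T' hT' (by simpa using hi)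
    simp only [List.getElem_cons_succ]
    refine ⟨by omega, hrec.2.1, by omega, ?_⟩
    intro hi1
    exact hrec.2.2.2 (by simpa using hi1)

-- indexing a filtered list below a prefix on which the predicate holds
lemma wtcFilterGet : ∀ (l : List Int) (p : Int → Bool) (m k : Nat), k < m → m ≤ l.length →
    (∀ x ∈ l.take m, p x = true) → (l.filter p)[k]? = l[k]? := by
  intro l
  induction l with
  | nil => intro p m k hk hm hall; simp at hm; omega
  | cons x l' ih =>
    intro p m k hk hm hall
    obtain ⟨m', rfl⟩ : ∃ m', m = m' + 1 := ⟨m - 1, by omega⟩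
    have hx : p x = true := hall x (by simp)
    rw [List.filter_cons, if_pos hx]
    cases k with
    | zero => simp
    | succ k' =>
      simp only [List.getElem?_cons_succ]
      exact ih p m' k' (by omega) (by simp at hm; omega)
        (fun y hy => hall y (by simp [hy]))

-- the for-loop of A returns the (wc - cur)-th word-end boundary of the suffix
lemma wtcLoopA_eq (cs : List Char) (wc : Int) :
    ∀ (suf : List Char) (s cur : Int) (prev : Bool),
      0 ≤ s → cs.drop s.toNat = suf →
      (0 < s → ((PySem.List.pyGet? cs (s - 1)).map PySem.Chars.isspace).getD true = prev) →
      (s = 0 → prev = true) →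
      wtcLoopA cs wc (PySem.List.enumerate suf s) cur
        = (wtcEnds suf s prev)[(wc - cur - 1).toNat]? := by
  intro suf
  induction suf with
  | nil => intro s cur prev _ _ _ _; simp [PySem.List.enumerate, wtcLoopA, wtcEnds]
  | cons c rest ih =>
    intro s cur prev h0 hdrop hprev hzero
    have hlt : s.toNat < cs.length := by
      by_contra h
      push Not at h
      rw [List.drop_eq_nil_of_le h] at hdrop
      simp at hdrop
    have hget : cs[s.toNat]? = some c := by
      have h1 : (cs.drop s.toNat)[0]? = some c := by rw [hdrop]; rfl
      rwa [List.getElem?_drop, Nat.add_zero] at h1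
    have hpg : PySem.List.pyGet? cs s = some c := by
      have hc : (s.toNat : Int) = s := Int.toNat_of_nonneg h0
      rw [← hc, PySem.List.pyGet?_natCast, hget]
    have hdrop' : cs.drop (s + 1).toNat = rest := by
      have h1 : (s + 1).toNat = s.toNat + 1 := by omega
      rw [h1, ← List.drop_drop, hdrop, List.drop_one, List.tail_cons]
    rw [PySem.List.enumerate_cons]
    by_cases hsp : PySem.Chars.isspace c
    · have hcond : (0 < s ∧ ((PySem.List.pyGet? cs (s - 1)).map PySem.Chars.isspace).getD true = false)
          ↔ prev = false := by
        constructor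
        · rintro ⟨hspos, hv⟩
          rw [← hprev hspos]; exact hv
        · intro hpf
          rcases lt_or_eq_of_le h0 with hspos | hs0
          · exact ⟨hspos, by rw [hprev hspos, hpf]⟩
          · exact absurd (hzero hs0.symm) (by simp [hpf])
      have hprev' : (0 < s + 1 → ((PySem.List.pyGet? cs (s + 1 - 1)).map PySem.Chars.isspace).getD true = true) := by
        intro _
        simp only [add_sub_cancel_right, hpg, Option.map_some, Option.getD_some, hsp]
      cases prev with
      | false =>
        have hc2 : (0 < s ∧ ((PySem.List.pyGet? cs (s - 1)).map PySem.Chars.isspace).getD true = false) := hcond.mpr rfl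
        simp only [wtcLoopA, wtcEnds, hsp, if_pos, if_pos hc2]
        by_cases hwc : cur + 1 ≥ wc
        · have ht : (wc - cur - 1).toNat = 0 := by omega
          simp [hwc, ht]
        · have ht : (wc - cur - 1).toNat = (wc - (cur + 1) - 1).toNat + 1 := by omega
          rw [if_neg hwc,
            ih (s + 1) (cur + 1) true (by omega) hdrop' (fun _ => hprev' (by omega)) (by omega), ht]
          simp
      | true =>
        have hc2 : ¬ (0 < s ∧ ((PySem.List.pyGet? cs (s - 1)).map PySem.Chars.isspace).getD true = false) := by
          intro h; exact absurd (hcond.mp h) (by simp)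
        simp only [wtcLoopA, wtcEnds, hsp, if_pos, if_neg hc2]
        exact ih (s + 1) cur true (by omega) hdrop' (fun _ => hprev' (by omega)) (by omega)
    · have hprev' : (0 < s + 1 → ((PySem.List.pyGet? cs (s + 1 - 1)).map PySem.Chars.isspace).getD true = false) := by
        intro _
        simp only [add_sub_cancel_right, hpg, Option.map_some, Option.getD_some]
        exact Bool.eq_false_iff.mpr hsp
      simp only [wtcLoopA, wtcEnds, hsp, Bool.false_eq_true]
      exact ih (s + 1) cur false (by omega) hdrop' (fun _ => hprev' (by omega)) (by omega)

-- the single-token case: the boundary list is empty or the token end, decided by the last char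
lemma wtcSingle (cs : List Char) (st : Int) (t : List Char)
    (hT : wtcToks cs 0 = [(st, t)]) :
    0 ≤ st ∧ t ≠ [] ∧
    (if ((cs.getLast?).map PySem.Chars.isspace).getD false = true
      then wtcEnds cs 0 true = [st + (t.length : Int)]
      else wtcEnds cs 0 true = []) := by
  obtain ⟨sp, u', hu, hsp, hst, ht, hth, hT', hh⟩ := wtcToks_cons cs 0 st t [] hT
  have hE := wtcEnds_toks cs 0
  rw [hT] at hE
  simp only [List.map_cons, List.map_nil] at hE
  refine ⟨by omega, ht, ?_⟩
  cases hu' : u' with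
  | nil =>
    have hlast : cs.getLast? = t.getLast? := by
      rw [hu, hu', List.append_nil, List.getLast?_append]
      cases htl : t.getLast? with
      | none => simp [List.getLast?_eq_none_iff.mp htl] at ht
      | some x => simp
    obtain ⟨x, hx⟩ : ∃ x, t.getLast? = some x := by
      cases htl : t.getLast? with
      | none => simp [List.getLast?_eq_none_iff.mp htl] at ht
      | some x => exact ⟨x, rfl⟩
    have hxm : x ∈ t := by
      have := List.mem_getLast?_eq_getLast (l := t) hx
      obtain ⟨h1, h2⟩ := this
      rw [h2]; exact List.getLast_mem h1
    have hxs : ¬ PySem.Chars.isspace x := hth x hxm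
    rw [if_neg (by simp [hlast, hx, hxs])]
    have hcl : (cs.length : Int) = st + t.length := by
      rw [hu, hu', List.append_nil]
      push_cast [List.length_append]
      omega
    rw [hE, List.filter_cons]
    rw [show (decide (st + (t.length : Int) < 0 + (cs.length : Int))) = false from by
      simp only [decide_eq_false_iff_not]
      omega]
    simp
  | cons y ys =>
    have hallsp : ∀ c ∈ u', PySem.Chars.isspace c := by
      rw [← wtcToks_nil_iff u' (st + (t.length : Int))]
      exact hT'.symm
    obtain ⟨z, hz⟩ : ∃ z, u'.getLast? = some z := by
      rw [hu']; cases hl : (y :: ys).getLast? with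
      | none => simp at hl
      | some z => exact ⟨z, rfl⟩
    have hzm : z ∈ u' := by
      have := List.mem_getLast?_eq_getLast (l := u') hz
      obtain ⟨h1, h2⟩ := this
      rw [h2]; exact List.getLast_mem h1
    have hzs : PySem.Chars.isspace z := hallsp z hzm
    have hlast : cs.getLast? = some z := by
      rw [hu, List.append_assoc, List.getLast?_append]
      rw [show (t ++ u').getLast? = some z from by
        rw [List.getLast?_append, hz]; rfl]
      rfl
    rw [if_pos (by simp [hlast, hzs])]
    have hcl : st + (t.length : Int) < (cs.length : Int) := by
      rw [hu, hu']
      push_cast [List.length_append]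
      simp at hst ⊢
      omega
    rw [hE, List.filter_cons]
    rw [show (decide (st + (t.length : Int) < 0 + (cs.length : Int))) = true from by
      simp only [decide_eq_true_eq]
      omega]
    simp

-- below the (k+1)-th of at least k+2 tokens, the boundary list agrees with the token-end list
lemma wtcEndsGet (cs : List Char) (k : Nat) (q : Int × List Char)
    (hk1 : k + 1 < (wtcToks cs 0).length)
    (hq : (wtcToks cs 0)[k]? = some q) :
    (wtcEnds cs 0 true)[k]? = some (q.1 + (q.2.length : Int)) := by
  rw [wtcEnds_toks cs 0]
  rw [wtcFilterGet _ _ ((wtcToks cs 0).length - 1) k (by omega) (by simp) ?hall]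
  · rw [List.getElem?_map, hq]
    rfl
  case hall =>
    intro x hx
    obtain ⟨j, hj, hxj⟩ := List.getElem_of_mem hx
    have hjlt : j + 1 < (wtcToks cs 0).length := by
      simp at hj; omega
    have hxval : x = ((wtcToks cs 0)[j]'(by omega)).1
        + ((((wtcToks cs 0)[j]'(by omega)).2.length : Nat) : Int) := by
      rw [← hxj, List.getElem_take, List.getElem_map]
    have hb1 := wtcToks_bounds j cs 0 (wtcToks cs 0) rfl (by omega)
    have hb2 := wtcToks_bounds (j + 1) cs 0 (wtcToks cs 0) rfl hjlt
    have hlen1 : 1 ≤ ((wtcToks cs 0)[j + 1]'hjlt).2.length := by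
      have := hb2.2.1
      cases hv : ((wtcToks cs 0)[j + 1]'hjlt).2 with
      | nil => exact absurd hv this
      | cons _ _ => simp
    have hlt := hb1.2.2.2 hjlt
    have hle := hb2.2.2.1
    simp only [decide_eq_true_eq, hxval]
    push_cast at hle hlt ⊢
    omega

-- ===== VERDICT (by name: the statements are the Claim_ definitions above) =====
theorem words_to_chars_py_spec : Claim_unchanged_words_to_chars_py := by
  intro text wc hdom hpre hnd
  rw [D_words_to_chars_py] at hnd
  show words_to_chars_py text wc = words_to_chars_py_alt text wc
  unfold words_to_chars_py words_to_chars_py_alt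
  simp only []
  generalize text.toList = cs at hnd ⊢
  rw [wtcSplit_eq cs 0] at hnd ⊢
  simp only [List.length_map] at hnd ⊢
  by_cases hge : wc ≥ ((wtcToks cs 0).length : Int)
  · rw [if_pos hge, if_pos hge]
  · rw [if_neg hge, if_neg hge]
    have hA := wtcLoopA_eq cs wc cs 0 0 true le_rfl (by simp)
      (fun h => absurd h (by omega)) (fun _ => rfl)
    rw [hA]
    by_cases hwc0 : wc ≤ 0
    · -- word_count = 0 outside D_: one token not followed by whitespace, both sides give 0
      have hwc : wc = 0 := le_antisymm hwc0 hpre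
      subst hwc
      rw [if_pos hwc0]
      push Not at hnd
      have hnd2 := hnd rfl (by omega)
      have hone : (wtcToks cs 0).length = 1 := by omega
      have hlastf : ((cs.getLast?).map PySem.Chars.isspace).getD false = false := by
        cases hv : ((cs.getLast?).map PySem.Chars.isspace).getD false with
        | false => rfl
        | true => exact absurd hv hnd2.2
      obtain ⟨st, t, hTeq⟩ : ∃ st t, wtcToks cs 0 = [(st, t)] := by
        cases hv : wtcToks cs 0 with
        | nil => rw [hv] at hone; simp at hone
        | cons a T' =>
          rw [hv] at hone
          simp at hone
          exact ⟨a.1, a.2, by subst hone; simp⟩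
      have hsingle := wtcSingle cs st t hTeq
      rw [if_neg (by rw [hlastf]; simp)] at hsingle
      rw [hsingle.2.2]
      simp only [List.getElem?_nil]
      simp [PySem.Int.truncdiv]
    · -- word_count ≥ 1: both sides return the end of token (wc-1)
      rw [if_neg hwc0]
      have hk1 : (wc - 0 - 1).toNat + 1 < (wtcToks cs 0).length := by omega
      have hq : (wtcToks cs 0)[(wc - 0 - 1).toNat]?
          = some ((wtcToks cs 0)[(wc - 0 - 1).toNat]'(by omega)) :=
        List.getElem?_eq_getElem (by omega)
      rw [wtcEndsGet cs ((wc - 0 - 1).toNat) ((wtcToks cs 0)[(wc - 0 - 1).toNat]'(by omega)) hk1 hq]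
      rw [PySem.List.slice_to _ (by omega)]
      rw [← List.map_take]
      have htake : (wtcToks cs 0).take wc.toNat = (wtcToks cs 0).take ((wc - 0 - 1).toNat + 1) := by
        congr 1; omega
      rw [htake, List.map_take]
      have hfold := wtcFoldB cs ((wc - 0 - 1).toNat) cs 0 (wtcToks cs 0) le_rfl (by simp) rfl (by omega)
      rw [hfold]

theorem words_to_chars_py_changed : Claim_changed_words_to_chars_py := by
  unfold Claim_changed_words_to_chars_py; decide

theorem words_to_chars_py_tight : Claim_exact_words_to_chars_py := by
  intro text wc hdom hpre hD
  rw [D_words_to_chars_py] at hD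
  obtain ⟨hwc, hn1, hor⟩ := hD
  subst hwc
  unfold words_to_chars_py words_to_chars_py_alt
  simp only []
  generalize text.toList = cs at hn1 hor ⊢
  rw [wtcSplit_eq cs 0] at hn1 hor ⊢
  simp only [List.length_map] at hn1 hor ⊢
  rw [if_neg (by omega), if_neg (by omega), if_pos (by omega)]
  have hA := wtcLoopA_eq cs 0 cs 0 0 true le_rfl (by simp)
    (fun h => absurd h (by omega)) (fun _ => rfl)
  rw [hA]
  rw [show (((0 : Int) - 0 - 1).toNat) = 0 from by norm_num]
  suffices h : ∃ e, (wtcEnds cs 0 true)[(0 : Nat)]? = some e ∧ 1 ≤ e by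
    obtain ⟨e, he, he1⟩ := h
    rw [he]
    exact (by omega : e ≠ 0)
  rcases Nat.lt_or_ge (wtcToks cs 0).length 2 with hsm | h2
  case inr =>
    -- at least two tokens: boundary 0 exists and is positive
    have hk1 : (0 : Nat) + 1 < (wtcToks cs 0).length := by omega
    have hq : (wtcToks cs 0)[(0 : Nat)]?
        = some ((wtcToks cs 0)[(0 : Nat)]'(by omega)) :=
      List.getElem?_eq_getElem (by omega)
    rw [wtcEndsGet cs 0 ((wtcToks cs 0)[(0 : Nat)]'(by omega)) hk1 hq]
    have hb := wtcToks_bounds 0 cs 0 (wtcToks cs 0) rfl (by omega)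
    refine ⟨_, rfl, ?_⟩
    have hlen1 : 1 ≤ ((wtcToks cs 0)[(0 : Nat)]'(by omega)).2.length := by
      cases hv : ((wtcToks cs 0)[(0 : Nat)]'(by omega)).2 with
      | nil => exact absurd hv hb.2.1
      | cons _ _ => simp
    have := hb.1
    omega
  case inl =>
    -- one token followed by trailing whitespace
    have hls : ((cs.getLast?).map PySem.Chars.isspace).getD false = true :=
      hor.resolve_left (by omega)
    have hone : (wtcToks cs 0).length = 1 := by omega
    obtain ⟨st, t, hTeq⟩ : ∃ st t, wtcToks cs 0 = [(st, t)] := by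
      cases hv : wtcToks cs 0 with
      | nil => rw [hv] at hone; simp at hone
      | cons a T' =>
        rw [hv] at hone
        simp at hone
        exact ⟨a.1, a.2, by subst hone; simp⟩
    have hsingle := wtcSingle cs st t hTeq
    rw [if_pos hls] at hsingle
    rw [hsingle.2.2]
    have hlen1 : 1 ≤ t.length := by
      cases hv : t with
      | nil => exact absurd hv hsingle.2.1
      | cons _ _ => simp
    refine ⟨st + (t.length : Int), ?_, by have := hsingle.1; omega⟩
    rfl
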